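-- pv_equiv track=rewrite | github.com/jramaswami/Binary_Search_Python | distance_sums.py | solve
-- ===== SOURCE A (Python) =====
-- import collections
--
-- def solve(nums):
--     indexes = collections.defaultdict(list)
--     for i, n in enumerate(nums):
--         indexes[n].append(i)
--     soln = [0 for _ in nums]
--     for n in indexes:
--         for i, a in enumerate(indexes[n]):
--             for j, b in enumerate(indexes[n]):
--                 if i != j:
--                     soln[a] += abs(b - a)
--     return soln
-- ===== SOURCE B (Python) =====
-- def solve(nums):
--     groups = {}
--     for i, n in enumerate(nums):
--         groups.setdefault(n, []).append(i)
--     soln = [0] * len(nums)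
--     for idxs in groups.values():
--         m = len(idxs)
--         total = sum(idxs)
--         left_cnt = 0
--         left_sum = 0
--         for p in idxs:
--             right_sum = total - left_sum - p
--             right_cnt = m - 1 - left_cnt
--             soln[p] = left_cnt * p - left_sum + (right_sum - right_cnt * p)
--             left_cnt += 1
--             left_sum += p
--     return soln
-- ===== Notes on version B (the rewrite author's own statement) =====
-- stated objective: faster
-- what changed: Replaces the quadratic all-pairs scan inside each equal-value group by a single left-to-right pass that maintains a running count and running sum of indices (prefix sums), computing each position's absolute-distance sum in O(1).
import Mathlib
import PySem

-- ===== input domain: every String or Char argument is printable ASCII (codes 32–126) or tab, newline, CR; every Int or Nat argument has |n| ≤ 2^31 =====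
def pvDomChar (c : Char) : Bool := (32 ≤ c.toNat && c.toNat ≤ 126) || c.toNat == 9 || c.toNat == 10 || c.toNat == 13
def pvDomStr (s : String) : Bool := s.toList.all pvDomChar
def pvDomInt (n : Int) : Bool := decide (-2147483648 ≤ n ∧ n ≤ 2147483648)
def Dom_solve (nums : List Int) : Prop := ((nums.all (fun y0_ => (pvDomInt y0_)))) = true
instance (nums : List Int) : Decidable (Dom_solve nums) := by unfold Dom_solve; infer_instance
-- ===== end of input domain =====

-- B replaces A's all-pairs scan inside each equal-value group by one left-to-right
-- pass keeping a running count and running sum of the group's indices (prefix sums).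

-- ===== PORT A =====
def solve (nums : List Int) : List Int :=
  let indexes : PySem.Dict Int (List Int) :=
    (PySem.List.enumerate nums).foldl
      (fun d p => d.modify p.2 [] (fun l => l ++ [p.1])) PySem.Dict.empty
  let soln : List Int := nums.map (fun _ => (0 : Int))
  indexes.keys.foldl (fun soln n =>
    let g := indexes.getD n []
    (PySem.List.enumerate g).foldl (fun soln ia =>
      (PySem.List.enumerate g).foldl (fun soln jb =>
        if ia.1 ≠ jb.1 then
          PySem.List.pySetD soln ia.2 (PySem.List.pyGetD soln ia.2 0 + |jb.2 - ia.2|)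
        else soln) soln) soln) soln

-- ===== PORT B =====
def solve_alt (nums : List Int) : List Int :=
  let groups : PySem.Dict Int (List Int) :=
    (PySem.List.enumerate nums).foldl
      (fun d p => d.modify p.2 [] (fun l => l ++ [p.1])) PySem.Dict.empty
  let soln : List Int := List.replicate nums.length 0
  groups.values.foldl (fun soln idxs =>
    let m : Int := PySem.List.len idxs
    let total : Int := idxs.sum
    (idxs.foldl (fun (st : List Int × Int × Int) p =>
        let rs := total - st.2.2 - p
        let rc := m - 1 - st.2.1
        (PySem.List.pySetD st.1 p (st.2.1 * p - st.2.2 + (rs - rc * p)),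
         st.2.1 + 1, st.2.2 + p))
      (soln, 0, 0)).1) soln

-- ===== PRECONDITION & SPEC =====
def Spec_solve (nums : List Int) (out : List Int) : Prop := out = solve_alt nums
instance (nums : List Int) (out : List Int) : Decidable (Spec_solve nums out) := by unfold Spec_solve; infer_instance

-- ===== CLAIM (what is proved, stated in full; the proofs are below) =====
def Claim_equal_solve : Prop := ∀ (nums : List Int), Dom_solve nums → Spec_solve nums (solve nums)

-- ===== LEMMAS AND PROOFS =====

-- Sum of absolute distances from a to the members of g.
def sAbs (g : List Int) (a : Int) : Int := (g.map (fun b => |b - a|)).sum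

-- Write sAbs g a at every position a of g.
def updAll (g : List Int) (s : List Int) : List Int :=
  g.foldl (fun t a => PySem.List.pySetD t a (sAbs g a)) s

-- The group of value c: the indices of nums holding c, in order.
def grp (nums : List Int) (c : Int) : List Int :=
  ((PySem.List.enumerate nums).filter (fun p => p.2 == c)).map (fun p => p.1)

-- The grouping dict both ports build.
def mkdict (nums : List Int) : PySem.Dict Int (List Int) :=
  (PySem.List.enumerate nums).foldl
    (fun d p => d.modify p.2 [] (fun l => l ++ [p.1])) PySem.Dict.empty

-- A's inner loop body (over one outer pair ia) and per-group step.
def innerStepA (g : List Int) (s : List Int) (ia : Int × Int) : List Int :=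
  (PySem.List.enumerate g).foldl (fun t jb =>
    if ia.1 ≠ jb.1 then
      PySem.List.pySetD t ia.2 (PySem.List.pyGetD t ia.2 0 + |jb.2 - ia.2|)
    else t) s

def stepA (g : List Int) (s : List Int) : List Int :=
  (PySem.List.enumerate g).foldl (innerStepA g) s

-- B's per-group step.
def stepB (g : List Int) (s : List Int) : List Int :=
  (g.foldl (fun (st : List Int × Int × Int) p =>
      (PySem.List.pySetD st.1 p
        (st.2.1 * p - st.2.2 + ((g.sum - st.2.2 - p) - ((PySem.List.len g) - 1 - st.2.1) * p)),
       st.2.1 + 1, st.2.2 + p)) (s, 0, 0)).1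

theorem solve_eq (nums : List Int) :
    solve nums
      = (mkdict nums).keys.foldl
          (fun t c => stepA ((mkdict nums).getD c []) t) (nums.map (fun _ => (0:Int))) := rfl

theorem solve_alt_eq (nums : List Int) :
    solve_alt nums
      = (mkdict nums).values.foldl (fun t g => stepB g t) (List.replicate nums.length 0) := rfl

theorem mem_grp {nums : List Int} {c a : Int} :
    a ∈ grp nums c ↔ ∃ (k : Nat) (_ : k < nums.length), a = (k : Int) ∧ nums[k] = c := by
  unfold grp
  simp only [List.mem_map, List.mem_filter, PySem.List.mem_enumerate_iff]
  constructor
  · rintro ⟨p, ⟨⟨k, hk, rfl⟩, hc⟩, rfl⟩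
    refine ⟨k, hk, by simp, ?_⟩
    simpa using hc
  · rintro ⟨k, hk, rfl, hv⟩
    exact ⟨((k : Int), c), ⟨⟨k, hk, by simp [hv]⟩, by simp⟩, by simp⟩

theorem grp_pairwise (nums : List Int) (c : Int) : (grp nums c).Pairwise (· < ·) := by
  unfold grp
  exact List.Pairwise.map _ (fun a b h => h)
    ((PySem.List.pairwise_lt_enumerate nums 0).filter _)

theorem grp_nodup (nums : List Int) (c : Int) : (grp nums c).Nodup :=
  (grp_pairwise nums c).imp ne_of_lt

theorem grp_disjoint {nums : List Int} {c c' a : Int}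
    (h : a ∈ grp nums c) (h' : a ∈ grp nums c') : c = c' := by
  rcases mem_grp.1 h with ⟨k, hk, rfl, hv⟩
  rcases mem_grp.1 h' with ⟨k', hk', he, hv'⟩
  have : k = k' := by exact_mod_cast he
  subst this
  omega

theorem grp_bounds {nums : List Int} {c a : Int} (h : a ∈ grp nums c) :
    ∃ k : Nat, a = (k : Int) ∧ k < nums.length := by
  rcases mem_grp.1 h with ⟨k, hk, rfl, _⟩
  exact ⟨k, rfl, hk⟩

theorem length_foldl_pySetD (f : Int → Int) :
    ∀ (g s : List Int), (g.foldl (fun t a => PySem.List.pySetD t a (f a)) s).length = s.length := by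
  intro g
  induction g with
  | nil => intro s; rfl
  | cons a g ih => intro s; rw [List.foldl_cons, ih, PySem.List.length_pySetD]

theorem set_getD_self : ∀ (s : List Int) (k : Nat), s.set k (s.getD k 0) = s := by
  intro s
  induction s with
  | nil => intro k; rfl
  | cons x s ih =>
    intro k
    cases k with
    | zero => simp
    | succ n =>
      rw [List.getD_cons_succ]
      show x :: s.set n (s.getD n 0) = x :: s
      rw [ih n]

theorem pySetD_getD_self (s : List Int) (k : Nat) :
    PySem.List.pySetD s (k : Int) (PySem.List.pyGetD s (k : Int) 0) = s := by
  simp only [PySem.List.pySetD_natCast, PySem.List.pyGetD_natCast]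
  exact set_getD_self s k

theorem pyGetD_set_ne (s : List Int) (k k' : Nat) (v : Int) (h : k' ≠ k) :
    PySem.List.pyGetD (s.set k v) (k' : Int) 0 = PySem.List.pyGetD s (k' : Int) 0 := by
  simp only [PySem.List.pyGetD_natCast]
  simp [List.getD_eq_getElem?_getD, List.getElem?_set_ne (by omega : k ≠ k')]

theorem pyGetD_foldl_set_not_mem (f : Int → Int) (k' : Nat) :
    ∀ (g s : List Int), (∀ a ∈ g, ∃ k : Nat, a = (k : Int)) → ((k' : Int) ∉ g) →
      PySem.List.pyGetD (g.foldl (fun t a => PySem.List.pySetD t a (f a)) s) (k' : Int) 0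
        = PySem.List.pyGetD s (k' : Int) 0 := by
  intro g
  induction g with
  | nil => intro s _ _; rfl
  | cons a g ih =>
    intro s hb hm
    rcases hb a (by simp) with ⟨k, rfl⟩
    rw [List.foldl_cons, ih _ (fun x hx => hb x (by simp [hx])) (by simp at hm; exact hm.2)]
    rw [PySem.List.pySetD_natCast]
    exact pyGetD_set_ne s k k' (f (k:Int)) (by intro h; apply hm; simp [h])

theorem pyGetD_replicate_zero (n : Nat) (i : Int) :
    PySem.List.pyGetD (List.replicate n (0:Int)) i 0 = 0 := by
  by_cases h : PySem.Raise.InRange (List.replicate n (0:Int)).length i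
  · have hm : PySem.List.pyGetD (List.replicate n (0:Int)) i 0 ∈ List.replicate n (0:Int) := by
      apply PySem.List.pyGetD_mem
      exact h
    exact List.eq_of_mem_replicate hm
  · have h0 : PySem.List.pyGet? (List.replicate n (0:Int)) i = none :=
      (PySem.List.pyGet?_eq_none_iff _ _).2 h
    exact PySem.List.pyGetD_of_none _ _ _ h0

theorem map_zero_eq_replicate (l : List Int) :
    l.map (fun _ => (0:Int)) = List.replicate l.length 0 := by
  induction l with
  | nil => rfl
  | cons x l ih => simp [List.replicate_succ, ih]

-- ------- the dict characterization -------

theorem mkdict_getD (nums : List Int) (c : Int) : (mkdict nums).getD c [] = grp nums c := by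
  unfold mkdict grp
  have hswap : ∀ (l : List (Int × Int)) (d : PySem.Dict Int (List Int)),
      l.foldl (fun d p => d.modify p.2 [] (fun s => s ++ [p.1])) d
        = (l.map (fun p => (p.2, p.1))).foldl
            (fun d q => d.modify q.1 [] (fun s => s ++ [q.2])) d := by
    intro l
    induction l with
    | nil => intro d; rfl
    | cons p l ih => intro d; rw [List.foldl_cons, List.map_cons, List.foldl_cons, ih]
  rw [hswap]
  rw [PySem.Dict.getD_foldl_modify_append]
  simp [List.filter_map, List.map_map, Function.comp_def]

theorem mkdict_keys_nodup (nums : List Int) : (mkdict nums).keys.Nodup := by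
  unfold mkdict
  exact PySem.Dict.nodup_keys_foldl_modify_key (PySem.List.enumerate nums)
    (fun p => p.2) [] (fun _ p => fun l => l ++ [p.1]) PySem.Dict.empty
    PySem.Dict.nodup_keys_empty

-- ------- A's loops -------

theorem innerA (i a : Int) (k : Nat) (ha : a = (k : Int)) :
    ∀ (l : List (Int × Int)) (s : List Int), k < s.length →
      l.foldl (fun t jb => if i ≠ jb.1 then
          PySem.List.pySetD t a (PySem.List.pyGetD t a 0 + |jb.2 - a|) else t) s
      = PySem.List.pySetD s a (PySem.List.pyGetD s a 0
          + (l.map (fun jb => if i ≠ jb.1 then |jb.2 - a| else 0)).sum) := by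
  subst ha
  intro l
  induction l with
  | nil =>
    intro s hk
    simp only [List.foldl_nil, List.map_nil, List.sum_nil, add_zero]
    exact (pySetD_getD_self s k).symm
  | cons jb l ih =>
    intro s hk
    rw [List.foldl_cons, List.map_cons, List.sum_cons]
    by_cases hij : i ≠ jb.1
    · rw [if_pos hij, if_pos hij]
      rw [ih _ (by rw [PySem.List.length_pySetD]; exact hk)]
      rw [PySem.List.pyGetD_pySetD_natCast _ _ _ _ _ hk, if_pos rfl]
      simp only [PySem.List.pySetD_natCast, List.set_set]
      rw [add_assoc]
    · rw [if_neg hij, if_neg hij, ih _ hk]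
      rw [zero_add]

theorem sumT (pre suf : List Int) (a : Int) :
    ((PySem.List.enumerate (pre ++ a :: suf)).map
        (fun jb => if ((pre.length : Int)) ≠ jb.1 then |jb.2 - a| else 0)).sum
    = sAbs (pre ++ a :: suf) a := by
  have habs : ∀ (l : List Int) (s : Int),
      (∀ jb ∈ PySem.List.enumerate l s, ((pre.length : Int)) ≠ jb.1) →
      ((PySem.List.enumerate l s).map
        (fun jb => if ((pre.length : Int)) ≠ jb.1 then |jb.2 - a| else 0)).sum
      = sAbs l a := by
    intro l s hne
    have hsnd : (PySem.List.enumerate l s).map (fun jb => |jb.2 - a|)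
        = l.map (fun b => |b - a|) := by
      have h2 := PySem.List.map_snd_enumerate l s
      calc (PySem.List.enumerate l s).map (fun jb => |jb.2 - a|)
          = ((PySem.List.enumerate l s).map (fun p => p.2)).map (fun b => |b - a|) := by
            rw [List.map_map]
            rfl
        _ = l.map (fun b => |b - a|) := by rw [h2]
    rw [List.map_congr_left (fun jb hjb => if_pos (hne jb hjb)), hsnd]
    rfl
  rw [PySem.List.enumerate_append, PySem.List.enumerate_cons]
  rw [List.map_append, List.sum_append, List.map_cons, List.sum_cons]
  rw [habs pre 0 (by
    intro jb hjb
    rcases (PySem.List.mem_enumerate_iff _ _ _).1 hjb with ⟨j, hj, he⟩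
    have h1 : jb.1 = 0 + (j : Int) := by rw [he]
    rw [h1]
    omega)]
  rw [habs suf (0 + (pre.length : Int) + 1) (by
    intro jb hjb
    rcases (PySem.List.mem_enumerate_iff _ _ _).1 hjb with ⟨j, hj, he⟩
    have h1 : jb.1 = 0 + (pre.length : Int) + 1 + (j : Int) := by rw [he]
    rw [h1]
    omega)]
  rw [if_neg (by omega)]
  unfold sAbs
  simp [sub_self, abs_zero, List.map_append, List.sum_append]

theorem midA (N : Nat) (g : List Int) (hnd : g.Nodup)
    (hb : ∀ a ∈ g, ∃ k : Nat, a = (k : Int) ∧ k < N) :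
    ∀ (suf pre : List Int) (s : List Int), g = pre ++ suf → s.length = N →
      (PySem.List.enumerate suf ((pre.length : Int))).foldl (innerStepA g) s
      = suf.foldl (fun t x => PySem.List.pySetD t x (PySem.List.pyGetD s x 0 + sAbs g x)) s := by
  intro suf
  induction suf with
  | nil => intro pre s _ _; rfl
  | cons a suf ih =>
    intro pre s hg hs
    rcases hb a (by rw [hg]; simp) with ⟨k, hak, hkN⟩
    rw [PySem.List.enumerate_cons, List.foldl_cons, List.foldl_cons]
    have hstep : innerStepA g s ((pre.length : Int), a)
        = PySem.List.pySetD s a (PySem.List.pyGetD s a 0 + sAbs g a) := by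
      unfold innerStepA
      rw [innerA ((pre.length : Int)) a k hak _ s (by omega)]
      rw [hg, sumT pre suf a]
    rw [hstep]
    have hlen : (PySem.List.pySetD s a (PySem.List.pyGetD s a 0 + sAbs g a)).length = N := by
      rw [PySem.List.length_pySetD]; exact hs
    have := ih (pre ++ [a]) (PySem.List.pySetD s a (PySem.List.pyGetD s a 0 + sAbs g a))
      (by rw [hg]; simp) hlen
    rw [show ((pre.length : Int)) + 1 = (((pre ++ [a]).length : Nat) : Int) by simp] 
    rw [this]
    apply PySem.List.foldl_congr_mem
    intro acc x hx
    have hxg : x ∈ g := by rw [hg]; simp [hx]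
    rcases hb x hxg with ⟨k', hxk', _⟩
    have hxa : x ≠ a := by
      have h2 := (List.nodup_append.1 (hg ▸ hnd)).2.1
      have hasuf : a ∉ suf := (List.nodup_cons.1 h2).1
      intro h; exact hasuf (h ▸ hx)
    have hkk : k' ≠ k := by intro h; apply hxa; rw [hxk', hak, h]
    rw [hak, hxk']
    simp only [PySem.List.pySetD_natCast]
    rw [pyGetD_set_ne s k k' _ hkk]

theorem stepA_eq (N : Nat) (g : List Int) (hnd : g.Nodup)
    (hb : ∀ a ∈ g, ∃ k : Nat, a = (k : Int) ∧ k < N)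
    (s : List Int) (hs : s.length = N) (hz : ∀ a ∈ g, PySem.List.pyGetD s a 0 = 0) :
    stepA g s = updAll g s := by
  have h := midA N g hnd hb g [] s rfl hs
  simp only [List.length_nil, Nat.cast_zero] at h
  unfold stepA
  rw [h]
  unfold updAll
  apply PySem.List.foldl_congr_mem
  intro acc x hx
  rw [hz x hx, zero_add]

-- ------- B's loop -------

theorem sAbs_le (l : List Int) (p : Int) (h : ∀ b ∈ l, b ≤ p) :
    sAbs l p = (l.length : Int) * p - l.sum := by
  induction l with
  | nil => simp [sAbs]
  | cons b l ih =>
    have hb : b ≤ p := h b (by simp)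
    have := ih (fun x hx => h x (by simp [hx]))
    unfold sAbs at *
    rw [List.map_cons, List.sum_cons, this, abs_of_nonpos (by omega),
        List.length_cons, List.sum_cons]
    push_cast
    ring

theorem sAbs_ge (l : List Int) (p : Int) (h : ∀ b ∈ l, p ≤ b) :
    sAbs l p = l.sum - (l.length : Int) * p := by
  induction l with
  | nil => simp [sAbs]
  | cons b l ih =>
    have hb : p ≤ b := h b (by simp)
    have := ih (fun x hx => h x (by simp [hx]))
    unfold sAbs at *
    rw [List.map_cons, List.sum_cons, this, abs_of_nonneg (by omega),
        List.length_cons, List.sum_cons]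
    push_cast
    ring

theorem midB (g : List Int) (hsort : g.Pairwise (· < ·)) :
    ∀ (suf pre : List Int) (s : List Int), g = pre ++ suf →
      (suf.foldl (fun (st : List Int × Int × Int) p =>
          (PySem.List.pySetD st.1 p
            (st.2.1 * p - st.2.2 + ((g.sum - st.2.2 - p) - ((PySem.List.len g) - 1 - st.2.1) * p)),
           st.2.1 + 1, st.2.2 + p)) (s, ((pre.length : Int)), pre.sum)).1
      = suf.foldl (fun t p => PySem.List.pySetD t p (sAbs g p)) s := by
  intro suf
  induction suf with
  | nil => intro pre s _; rfl
  | cons p suf ih =>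
    intro pre s hg
    rw [List.foldl_cons, List.foldl_cons]
    have hV : (pre.length : Int) * p - pre.sum
        + ((g.sum - pre.sum - p) - ((PySem.List.len g) - 1 - (pre.length : Int)) * p)
        = sAbs g p := by
      have hpre : ∀ b ∈ pre, b ≤ p := by
        intro b hb
        have := (List.pairwise_append.1 (hg ▸ hsort)).2.2 b hb p (by simp)
        omega
      have hsuf : ∀ b ∈ suf, p ≤ b := by
        intro b hb
        have hps : (p :: suf).Pairwise (· < ·) := (List.pairwise_append.1 (hg ▸ hsort)).2.1
        have := (List.pairwise_cons.1 hps).1 b hb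
        omega
      have h1 := sAbs_le pre p hpre
      have h2 := sAbs_ge suf p hsuf
      have h3 : sAbs g p = sAbs pre p + (|p - p| + sAbs suf p) := by
        rw [hg]; unfold sAbs; simp
      have h4 : g.sum = pre.sum + (p + suf.sum) := by rw [hg]; simp
      have h5 : (PySem.List.len g) = (pre.length : Int) + (1 + (suf.length : Int)) := by
        rw [hg, PySem.List.len_eq, List.length_append, List.length_cons]
        push_cast
        ring
      rw [h3, h1, h2, h4, h5, sub_self, abs_zero]
      ring
    rw [hV]
    have := ih (pre ++ [p]) (PySem.List.pySetD s p (sAbs g p)) (by rw [hg]; simp)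
    rw [show ((pre.length : Int)) + 1 = (((pre ++ [p]).length : Nat) : Int) by simp,
        show pre.sum + p = (pre ++ [p]).sum by simp]
    exact this

theorem stepB_eq (g : List Int) (hsort : g.Pairwise (· < ·)) (s : List Int) :
    stepB g s = updAll g s := by
  have h := midB g hsort g [] s rfl
  simp only [List.length_nil, Nat.cast_zero, List.sum_nil] at h
  unfold stepB updAll
  exact h

-- ------- gluing -------

theorem glueA (nums : List Int) :
    ∀ (K : List Int) (s : List Int), K.Nodup → s.length = nums.length →
      (∀ c ∈ K, ∀ a ∈ grp nums c, PySem.List.pyGetD s a 0 = 0) →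
      K.foldl (fun t c => stepA (grp nums c) t) s
        = K.foldl (fun t c => updAll (grp nums c) t) s := by
  intro K
  induction K with
  | nil => intro s _ _ _; rfl
  | cons c K ih =>
    intro s hnd hs hz
    rw [List.foldl_cons, List.foldl_cons]
    rw [stepA_eq nums.length (grp nums c) (grp_nodup nums c)
      (fun a ha => grp_bounds ha) s hs (hz c (by simp))]
    apply ih _ (List.nodup_cons.1 hnd).2
    · unfold updAll; rw [length_foldl_pySetD]; exact hs
    · intro c' hc' a ha
      rcases grp_bounds ha with ⟨k', hak', _⟩
      have hnm : a ∉ grp nums c := by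
        intro hmem
        have : c = c' := grp_disjoint hmem ha
        exact (List.nodup_cons.1 hnd).1 (this ▸ hc')
      unfold updAll
      rw [hak'] at hnm ⊢
      rw [pyGetD_foldl_set_not_mem _ k' _ s (fun x hx => ⟨(grp_bounds hx).choose, (grp_bounds hx).choose_spec.1⟩) hnm]
      rw [← hak']
      exact hz c' (List.mem_cons_of_mem _ hc') a ha

-- ===== VERDICT (by name: the statement is the Claim_ definition above) =====
theorem solve_spec : Claim_equal_solve := by
  unfold Claim_equal_solve
  intro nums _
  unfold Spec_solve
  rw [solve_eq, solve_alt_eq]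
  rw [PySem.Dict.values_eq_map_keys (mkdict nums) (mkdict_keys_nodup nums) []]
  rw [List.foldl_map]
  simp only [mkdict_getD]
  rw [map_zero_eq_replicate]
  rw [glueA nums (mkdict nums).keys (List.replicate nums.length 0) (mkdict_keys_nodup nums)
      (by simp) (fun c _ a _ => pyGetD_replicate_zero nums.length a)]
  apply PySem.List.foldl_congr_mem
  intro acc c _
  exact (stepB_eq (grp nums c) (grp_pairwise nums c) acc).symm
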